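-- pv_equiv track=rewrite | github.com/ChrisCreevey/gene_order_from_pangenome | gene_order_from_pangenome.py | process_genome
-- ===== SOURCE A (Python) =====
-- def process_genome(entries, gene_lookup, unknown_token, mark_strand, contig_sep):
--     """
--     Convert (locus_tag, seqid, strand) entries into gene-family name lists.
--
--     Returns:
--         all_genes   (list[str]): All genes in GFF order, with optional strand marks
--                                   and contig separators.
--         plus_genes  (list[str]): Genes on the + strand only, in GFF order.
--         minus_genes (list[str]): Genes on the - strand only, in GFF order.
--
--     Contig separators (if requested) are inserted into all three lists whenever the
--     sequence ID changes, regardless of strand.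
--     """
--     all_genes = []
--     plus_genes = []
--     minus_genes = []
--     prev_seqid = None
--
--     for lt, seqid, strand in entries:
--         # Insert contig boundary token when the sequence ID changes
--         if contig_sep is not None and prev_seqid is not None and seqid != prev_seqid:
--             all_genes.append(contig_sep)
--             plus_genes.append(contig_sep)
--             minus_genes.append(contig_sep)
--         prev_seqid = seqid
--
--         family = gene_lookup.get(lt)
--         if family:
--             label = f'{family}{strand}' if mark_strand else family
--         elif unknown_token != 'skip':
--             family = unknown_token
--             label = f'{unknown_token}{strand}' if mark_strand else unknown_token
--         else:
--             continue  # omit unknown genes entirely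
--
--         all_genes.append(label)
--         if strand == '+':
--             plus_genes.append(label)
--         else:
--             minus_genes.append(label)
--
--     return all_genes, plus_genes, minus_genes
-- ===== SOURCE B (Python) =====
-- def _runs(entries):
--     """Split entries into maximal consecutive groups sharing the same seqid."""
--     runs = []
--     n = len(entries)
--     i = 0
--     while i < n:
--         j = i + 1
--         while j < n and entries[j][1] == entries[i][1]:
--             j += 1
--         runs.append(entries[i:j])
--         i = j
--     return runs
--
--
-- def process_genome(entries, gene_lookup, unknown_token, mark_strand, contig_sep):
--     all_genes, plus_genes, minus_genes = [], [], []
--     first = True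
--     for run in _runs(entries):
--         if not first and contig_sep is not None:
--             all_genes.append(contig_sep)
--             plus_genes.append(contig_sep)
--             minus_genes.append(contig_sep)
--         first = False
--         for lt, _seqid, strand in run:
--             family = gene_lookup.get(lt)
--             if not family:
--                 if unknown_token == 'skip':
--                     continue
--                 family = unknown_token
--             label = family + strand if mark_strand else family
--             all_genes.append(label)
--             if strand == '+':
--                 plus_genes.append(label)
--             else:
--                 minus_genes.append(label)
--     return all_genes, plus_genes, minus_genes
-- ===== Notes on version B (the rewrite author's own statement) =====
-- stated objective: alternative
-- what changed: Replaced A's single pass with a prev_seqid sentinel by a two-phase pipeline: first split entries into maximal consecutive same-seqid runs, then emit the contig separator between runs and label entries within each run.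
import Mathlib
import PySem

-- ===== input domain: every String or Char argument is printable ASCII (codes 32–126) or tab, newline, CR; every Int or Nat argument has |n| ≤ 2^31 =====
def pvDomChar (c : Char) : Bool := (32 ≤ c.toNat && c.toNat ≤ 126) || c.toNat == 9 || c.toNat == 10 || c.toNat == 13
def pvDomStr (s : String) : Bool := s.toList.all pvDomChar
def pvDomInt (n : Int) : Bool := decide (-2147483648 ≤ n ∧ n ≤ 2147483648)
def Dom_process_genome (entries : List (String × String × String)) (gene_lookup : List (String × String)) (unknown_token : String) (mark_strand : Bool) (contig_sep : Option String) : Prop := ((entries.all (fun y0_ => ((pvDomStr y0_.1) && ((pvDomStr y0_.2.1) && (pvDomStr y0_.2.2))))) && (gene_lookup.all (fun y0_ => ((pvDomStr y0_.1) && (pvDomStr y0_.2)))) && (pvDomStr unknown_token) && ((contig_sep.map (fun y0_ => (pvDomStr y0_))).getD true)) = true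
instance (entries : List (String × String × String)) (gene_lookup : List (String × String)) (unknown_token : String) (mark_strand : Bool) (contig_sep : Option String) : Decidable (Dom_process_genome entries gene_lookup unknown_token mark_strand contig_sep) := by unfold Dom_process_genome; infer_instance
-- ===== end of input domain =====

-- B restates A's single pass with a prev_seqid sentinel as a two-phase pipeline: first split
-- the entries into maximal consecutive same-seqid runs, then emit a separator between runs and
-- run the per-entry labelling inside each run ('alternative': same cost, different decomposition).

-- ===== PORT A =====
-- loop body of A's single for-loop: optional contig separator, prev update, then labelling
def stepA (gl : PySem.Dict String String) (ut : String) (ms : Bool) (cs : Option String)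
    (st : (List String × List String × List String) × Option String)
    (e : String × String × String) : (List String × List String × List String) × Option String :=
  let ((allg, plus, minus), prev) := st
  let (lt, seqid, strand) := e
  let (allg, plus, minus) :=
    match cs, prev with
    | some c, some p => if seqid ≠ p then (allg ++ [c], plus ++ [c], minus ++ [c]) else (allg, plus, minus)
    | _, _ => (allg, plus, minus)
  let prev := some seqid
  -- family = gene_lookup.get(lt); 'if family:' is truthy only for a non-empty string
  let label? : Option String :=
    match gl.get? lt with
    | some f =>
        if f ≠ "" then some (if ms then f ++ strand else f)
        else if ut ≠ "skip" then some (if ms then ut ++ strand else ut) else none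
    | none => if ut ≠ "skip" then some (if ms then ut ++ strand else ut) else none
  match label? with
  | none => ((allg, plus, minus), prev)
  | some label =>
      ((allg ++ [label],
        if strand == "+" then plus ++ [label] else plus,
        if strand == "+" then minus else minus ++ [label]), prev)

def process_genome (entries : List (String × String × String)) (gene_lookup : List (String × String)) (unknown_token : String) (mark_strand : Bool) (contig_sep : Option String) : List String × List String × List String :=
  (entries.foldl (stepA (PySem.Dict.ofList gene_lookup) unknown_token mark_strand contig_sep)
    (([], [], []), none)).1

-- ===== PORT B =====
-- B's _runs: maximal consecutive groups with equal seqid (recursion on the not-yet-grouped tail)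
def runsB : List (String × String × String) → List (List (String × String × String))
  | [] => []
  | e :: rest =>
      (e :: rest.takeWhile (fun x => x.2.1 == e.2.1)) ::
        runsB (rest.dropWhile (fun x => x.2.1 == e.2.1))
termination_by l => l.length
decreasing_by
  simp only [List.length_cons]
  exact Nat.lt_succ_of_le ((rest.dropWhile_sublist _).length_le)

-- body of B's inner per-entry loop
def emitB (gl : PySem.Dict String String) (ut : String) (ms : Bool)
    (st : List String × List String × List String)
    (e : String × String × String) : List String × List String × List String :=
  let (allg, plus, minus) := st
  let (lt, _seqid, strand) := e
  let label? : Option String :=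
    match gl.get? lt with
    | some f =>
        if f ≠ "" then some (if ms then f ++ strand else f)
        else if ut ≠ "skip" then some (if ms then ut ++ strand else ut) else none
    | none => if ut ≠ "skip" then some (if ms then ut ++ strand else ut) else none
  match label? with
  | none => (allg, plus, minus)
  | some label =>
      (allg ++ [label],
       if strand == "+" then plus ++ [label] else plus,
       if strand == "+" then minus else minus ++ [label])

-- body of B's outer per-run loop (state carries the 'first' flag)
def runStepB (gl : PySem.Dict String String) (ut : String) (ms : Bool) (cs : Option String)
    (st : (List String × List String × List String) × Bool)
    (run : List (String × String × String)) : (List String × List String × List String) × Bool :=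
  let ((allg, plus, minus), first) := st
  let (allg, plus, minus) :=
    match first, cs with
    | false, some c => (allg ++ [c], plus ++ [c], minus ++ [c])
    | _, _ => (allg, plus, minus)
  (run.foldl (emitB gl ut ms) (allg, plus, minus), false)

def process_genome_alt (entries : List (String × String × String)) (gene_lookup : List (String × String)) (unknown_token : String) (mark_strand : Bool) (contig_sep : Option String) : List String × List String × List String :=
  ((runsB entries).foldl
    (runStepB (PySem.Dict.ofList gene_lookup) unknown_token mark_strand contig_sep)
    (([], [], []), true)).1

-- ===== PRECONDITION & SPEC =====
def Spec_process_genome (entries : List (String × String × String)) (gene_lookup : List (String × String)) (unknown_token : String) (mark_strand : Bool) (contig_sep : Option String) (out : List String × List String × List String) : Prop := out = process_genome_alt entries gene_lookup unknown_token mark_strand contig_sep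
instance (entries : List (String × String × String)) (gene_lookup : List (String × String)) (unknown_token : String) (mark_strand : Bool) (contig_sep : Option String) (out : List String × List String × List String) : Decidable (Spec_process_genome entries gene_lookup unknown_token mark_strand contig_sep out) := by unfold Spec_process_genome; infer_instance

-- ===== CLAIM (what is proved, stated in full; the proofs are below) =====
def Claim_equal_process_genome : Prop := ∀ (entries : List (String × String × String)) (gene_lookup : List (String × String)) (unknown_token : String) (mark_strand : Bool) (contig_sep : Option String), Dom_process_genome entries gene_lookup unknown_token mark_strand contig_sep → Spec_process_genome entries gene_lookup unknown_token mark_strand contig_sep (process_genome entries gene_lookup unknown_token mark_strand contig_sep)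

-- ===== LEMMAS AND PROOFS =====

-- the conditional separator append, as it occurs in both loop bodies
def addSep (cs : Option String) (st : List String × List String × List String) :
    List String × List String × List String :=
  match cs with
  | some c => (st.1 ++ [c], st.2.1 ++ [c], st.2.2 ++ [c])
  | none => st

lemma stepA_same (gl : PySem.Dict String String) (ut : String) (ms : Bool) (cs : Option String)
    (st : List String × List String × List String) (e : String × String × String)
    (h : e.2.1 = s) :
    stepA gl ut ms cs (st, some s) e = (emitB gl ut ms st e, some s) := by
  obtain ⟨lt, seqid, strand⟩ := e
  obtain ⟨a, p, m⟩ := st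
  simp only [] at h
  subst h
  cases cs <;> simp [stepA, emitB] <;> split <;> rfl

lemma stepA_none (gl : PySem.Dict String String) (ut : String) (ms : Bool) (cs : Option String)
    (st : List String × List String × List String) (e : String × String × String) :
    stepA gl ut ms cs (st, none) e = (emitB gl ut ms st e, some e.2.1) := by
  obtain ⟨lt, seqid, strand⟩ := e
  obtain ⟨a, p, m⟩ := st
  cases cs <;> simp [stepA, emitB] <;> split <;> rfl

lemma stepA_new (gl : PySem.Dict String String) (ut : String) (ms : Bool) (cs : Option String)
    (st : List String × List String × List String) (e : String × String × String)
    (h : e.2.1 ≠ s) :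
    stepA gl ut ms cs (st, some s) e = (emitB gl ut ms (addSep cs st) e, some e.2.1) := by
  obtain ⟨lt, seqid, strand⟩ := e
  obtain ⟨a, p, m⟩ := st
  simp only [] at h
  cases cs <;> simp [stepA, emitB, addSep, h] <;> split <;> rfl

-- within a run of constant seqid s, A's fold keeps prev = some s and acts like B's inner loop
lemma foldA_run (gl : PySem.Dict String String) (ut : String) (ms : Bool) (cs : Option String)
    (run : List (String × String × String)) (s : String)
    (h : ∀ x ∈ run, x.2.1 = s) (st : List String × List String × List String) :
    run.foldl (stepA gl ut ms cs) (st, some s) = (run.foldl (emitB gl ut ms) st, some s) := by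
  induction run generalizing st with
  | nil => rfl
  | cons e tl ih =>
      simp only [List.foldl_cons]
      rw [stepA_same gl ut ms cs st e (h e (by simp))]
      exact ih (fun x hx => h x (by simp [hx])) _

lemma head_dropWhile_false {α : Type} (p : α → Bool) (l : List α) :
    ∀ x, (l.dropWhile p).head? = some x → p x = false := by
  induction l with
  | nil => simp
  | cons a tl ih =>
      intro x hx
      by_cases hp : p a
      · rw [List.dropWhile_cons_of_pos hp] at hx; exact ih x hx
      · rw [List.dropWhile_cons_of_neg hp] at hx
        simp at hx; subst hx; simpa using hp

-- main induction: A's fold over entries equals B's fold over runsB entries; prev = none ↔ first = true,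
-- prev = some p with p ≠ head seqid ↔ first = false
lemma main_lemma (gl : PySem.Dict String String) (ut : String) (ms : Bool) (cs : Option String) :
    ∀ n (entries : List (String × String × String)), entries.length ≤ n →
      ∀ st : List String × List String × List String,
        (entries.foldl (stepA gl ut ms cs) (st, none)).1 =
          ((runsB entries).foldl (runStepB gl ut ms cs) (st, true)).1 ∧
        (∀ p : String, (∀ e, entries.head? = some e → e.2.1 ≠ p) →
          (entries.foldl (stepA gl ut ms cs) (st, some p)).1 =
            ((runsB entries).foldl (runStepB gl ut ms cs) (st, false)).1) := by
  intro n
  induction n with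
  | zero =>
      intro entries hlen st
      have : entries = [] := List.length_eq_zero_iff.mp (Nat.le_zero.mp hlen)
      subst this
      exact ⟨by simp [runsB], fun _ _ => by simp [runsB]⟩
  | succ m ih =>
      intro entries hlen st
      cases entries with
      | nil => exact ⟨by simp [runsB], fun _ _ => by simp [runsB]⟩
      | cons e rest =>
          set pred := fun x : String × String × String => x.2.1 == e.2.1 with hpred
          have hsplit : rest = rest.takeWhile pred ++ rest.dropWhile pred :=
            (List.takeWhile_append_dropWhile).symm
          have htw : ∀ x ∈ rest.takeWhile pred, x.2.1 = e.2.1 := by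
            intro x hx
            simpa [hpred] using List.mem_takeWhile_imp hx
          have hdlen : (rest.dropWhile pred).length ≤ m := by
            have h1 := (rest.dropWhile_sublist pred).length_le
            simp only [List.length_cons] at hlen
            omega
          have hdhead : ∀ x, (rest.dropWhile pred).head? = some x → x.2.1 ≠ e.2.1 := by
            intro x hx
            have := head_dropWhile_false pred rest x hx
            simpa [hpred] using this
          have hruns : runsB (e :: rest) =
              (e :: rest.takeWhile pred) :: runsB (rest.dropWhile pred) := by
            rw [runsB]
          -- the common tail after the first entry is consumed
          have core : ∀ st' : List String × List String × List String,
              (rest.foldl (stepA gl ut ms cs) (emitB gl ut ms st' e, some e.2.1)).1 =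
                ((runsB (rest.dropWhile pred)).foldl (runStepB gl ut ms cs)
                  ((e :: rest.takeWhile pred).foldl (emitB gl ut ms) st', false)).1 := by
            intro st'
            conv_lhs => rw [hsplit]
            rw [List.foldl_append,
              foldA_run gl ut ms cs (rest.takeWhile pred) e.2.1 htw (emitB gl ut ms st' e)]
            have := (ih (rest.dropWhile pred) hdlen
              ((rest.takeWhile pred).foldl (emitB gl ut ms) (emitB gl ut ms st' e))).2
              e.2.1 (fun x hx => hdhead x hx)
            simpa using this
          constructor
          · -- prev = none / first = true : no separator before e
            rw [hruns]
            simp only [List.foldl_cons]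
            rw [stepA_none]
            have hrs : runStepB gl ut ms cs (st, true) (e :: rest.takeWhile pred) =
                ((e :: rest.takeWhile pred).foldl (emitB gl ut ms) st, false) := by
              simp [runStepB]
            rw [hrs]
            exact core st
          · -- prev = some p with e.2.1 ≠ p / first = false : separator before e
            intro p hp
            have hne : e.2.1 ≠ p := hp e rfl
            rw [hruns]
            simp only [List.foldl_cons]
            rw [stepA_new gl ut ms cs st e hne]
            have hrs : runStepB gl ut ms cs (st, false) (e :: rest.takeWhile pred) =
                ((e :: rest.takeWhile pred).foldl (emitB gl ut ms) (addSep cs st), false) := by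
              cases cs <;> simp [runStepB, addSep]
            rw [hrs]
            exact core (addSep cs st)

-- ===== VERDICT (by name: the statement is the Claim_ definition above) =====
theorem process_genome_spec : Claim_equal_process_genome := by
  intro entries gene_lookup unknown_token mark_strand contig_sep _
  unfold Spec_process_genome process_genome process_genome_alt
  exact (main_lemma (PySem.Dict.ofList gene_lookup) unknown_token mark_strand contig_sep
    entries.length entries (le_refl _) ([], [], [])).1
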